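-- pv_equiv track=rewrite | github.com/y2sec/Algorithm | Programmers/56.py | solution
-- ===== SOURCE A (Python) =====
-- import itertools
--
-- def solution(user_id, banned_id):
--     banned = [[] for _ in range(len(banned_id))]
--
--     for i in range(len(banned_id)):
--         for uid in user_id:
--             if len(banned_id[i]) != len(uid):
--                 continue
--
--             isValid = True
--             for sidx in range(len(uid)):
--                 if banned_id[i][sidx] != '*' and banned_id[i][sidx] != uid[sidx]:
--                     isValid = False
--                     break
--
--             if isValid:
--                 banned[i].append(uid)
--     data = []
--     for comb in itertools.product(*banned):
--         if len(set(comb)) != len(comb):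
--             continue
--         data.append(tuple(sorted(list(comb))))
--
--     return len(set(data))
-- ===== SOURCE B (Python) =====
-- def solution(user_id, banned_id):
--     # matching phase: per-pattern candidate lists via a zip-based matcher
--     cands = [[u for u in user_id
--               if len(p) == len(u) and all(pc == '*' or pc == uc for pc, uc in zip(p, u))]
--              for p in banned_id]
--     combos = []
--
--     # recursive backtracking DFS over pattern indices with duplicate-user pruning
--     def dfs(i, path):
--         if i == len(cands):
--             combos.append(tuple(sorted(path)))
--             return
--         for u in cands[i]:
--             if u not in path:
--                 path.append(u)
--                 dfs(i + 1, path)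
--                 path.pop()
--
--     dfs(0, [])
--     return len(set(combos))
-- ===== Notes on version B (the rewrite author's own statement) =====
-- stated objective: alternative
-- what changed: Replaced itertools.product over all candidate tuples followed by a post-hoc distinctness filter and sorted-tuple dedup with a recursive backtracking DFS over the pattern indices that prunes duplicate users as it extends the partial assignment, and replaced the index-based character loop by a zip-based matcher.
import Mathlib
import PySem

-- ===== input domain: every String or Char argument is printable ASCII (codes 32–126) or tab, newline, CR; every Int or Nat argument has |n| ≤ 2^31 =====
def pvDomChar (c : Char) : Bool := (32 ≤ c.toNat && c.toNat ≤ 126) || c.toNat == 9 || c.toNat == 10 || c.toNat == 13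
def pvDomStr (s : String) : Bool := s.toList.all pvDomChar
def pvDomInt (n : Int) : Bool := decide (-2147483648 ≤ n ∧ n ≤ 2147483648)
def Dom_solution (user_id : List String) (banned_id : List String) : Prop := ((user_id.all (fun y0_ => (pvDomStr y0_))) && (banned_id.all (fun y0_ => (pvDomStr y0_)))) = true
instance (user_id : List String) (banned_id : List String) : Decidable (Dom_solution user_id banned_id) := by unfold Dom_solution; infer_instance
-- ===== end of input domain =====

-- B replaces itertools.product + post-hoc distinctness filter + sorted-tuple dedup by a
-- recursive backtracking DFS over the pattern indices that prunes duplicate users as it goes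
-- (objective: alternative; no speed claim).

-- ===== PORT A =====
-- the inner 'for sidx in range(len(uid))' loop with break (called only when len(pattern)=len(uid))
def pvValidLoopA (p u : List Char) (sidx : Nat) : Bool :=
  if sidx < u.length then
    if p.getD sidx ' ' ≠ '*' ∧ p.getD sidx ' ' ≠ u.getD sidx ' ' then false
    else pvValidLoopA p u (sidx + 1)
  else true
termination_by u.length - sidx

-- row construction: 'for uid in user_id: if len differs continue; check; append'
def pvRowA (pat : List Char) (user_id : List String) : List String :=
  user_id.foldl (fun acc uid =>
    if pat.length ≠ uid.toList.length then acc
    else if pvValidLoopA pat uid.toList 0 then acc ++ [uid] else acc) []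

-- itertools.product(*lists) in its iteration order (first index varies slowest)
def pvProduct : List (List String) → List (List String)
  | [] => [[]]
  | l :: ls => l.flatMap (fun x => (pvProduct ls).map (x :: ·))

def solution (user_id : List String) (banned_id : List String) : Int :=
  let banned := banned_id.map (fun b => pvRowA b.toList user_id)
  let data := (pvProduct banned).foldl (fun acc comb =>
    if (PySem.Set.ofList comb).length ≠ comb.length then acc
    else acc ++ [PySem.List.sorted comb (fun x => x) false]) []
  Int.ofNat (PySem.Set.ofList data).length

-- ===== PORT B =====
-- zip-based wildcard matcher
def pvMatchB (p u : List Char) : Bool :=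
  p.length == u.length && (p.zip u).all (fun pu => pu.1 == '*' || pu.1 == pu.2)

-- backtracking DFS over the remaining candidate lists; 'path' is the current assignment
def pvDfsB (cands : List (List String)) (path : List String) : List (List String) :=
  match cands with
  | [] => [PySem.List.sorted path (fun x => x) false]
  | l :: ls => l.flatMap (fun u => if u ∈ path then [] else pvDfsB ls (path ++ [u]))

def solution_alt (user_id : List String) (banned_id : List String) : Int :=
  let cands := banned_id.map (fun p => user_id.filter (fun u => pvMatchB p.toList u.toList))
  Int.ofNat (PySem.Set.ofList (pvDfsB cands [])).length

-- ===== PRECONDITION & SPEC =====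
def Spec_solution (user_id : List String) (banned_id : List String) (out : Int) : Prop := out = solution_alt user_id banned_id
instance (user_id : List String) (banned_id : List String) (out : Int) : Decidable (Spec_solution user_id banned_id out) := by unfold Spec_solution; infer_instance

-- ===== CLAIM (what is proved, stated in full; the proofs are below) =====
def Claim_equal_solution : Prop := ∀ (user_id : List String) (banned_id : List String), Dom_solution user_id banned_id → Spec_solution user_id banned_id (solution user_id banned_id)

-- ===== LEMMAS AND PROOFS =====

-- the character loop of A equals the zip-based all of B, for equal-length strings
theorem pvValid_eq_all (p u : List Char) (h : p.length = u.length) (sidx : Nat) :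
    pvValidLoopA p u sidx
      = ((p.drop sidx).zip (u.drop sidx)).all (fun pu => pu.1 == '*' || pu.1 == pu.2) := by
  induction sidx using pvValidLoopA.induct (p := p) (u := u) with
  | case1 sidx hlt hcond =>
    have hp : sidx < p.length := h ▸ hlt
    rw [pvValidLoopA]
    simp only [hlt, if_true]
    rw [List.drop_eq_getElem_cons hp, List.drop_eq_getElem_cons hlt]
    rw [List.getD_eq_getElem p ' ' hp, List.getD_eq_getElem u ' ' hlt] at hcond
    simp [List.getElem?_eq_getElem hp, List.getElem?_eq_getElem hlt, hcond.1, hcond.2]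
    refine ⟨p[sidx], u[sidx], ?_, hcond.1, hcond.2⟩
    rw [List.drop_eq_getElem_cons hp, List.drop_eq_getElem_cons hlt, List.zip_cons_cons]
    exact List.mem_cons_self ..
  | case2 sidx hlt hcond ih =>
    have hp : sidx < p.length := h ▸ hlt
    rw [pvValidLoopA]
    simp only [hlt, if_true]
    rw [List.drop_eq_getElem_cons hp, List.drop_eq_getElem_cons hlt]
    simp only [List.zip_cons_cons, List.all_cons]
    rw [ih]
    simp [List.getElem?_eq_getElem hp, List.getElem?_eq_getElem hlt]
    by_cases hstar : p[sidx] = '*'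
    · simp [hstar]
    · rw [List.getD_eq_getElem p ' ' hp, List.getD_eq_getElem u ' ' hlt] at hcond
      push_neg at hcond
      simp [hstar, hcond hstar]
  | case3 sidx hlt =>
    rw [pvValidLoopA]
    simp [hlt, List.drop_eq_nil_of_le (Nat.le_of_not_lt hlt)]

-- A's row loop (skip/check/append) is B's filter
theorem pvRowAux (pat : List Char) (xs : List String) (acc : List String) :
    xs.foldl (fun acc uid =>
      if pat.length ≠ uid.toList.length then acc
      else if pvValidLoopA pat uid.toList 0 then acc ++ [uid] else acc) acc
    = acc ++ xs.filter (fun u => pvMatchB pat u.toList) := by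
  induction xs generalizing acc with
  | nil => simp
  | cons x t ih =>
    rw [List.foldl_cons, List.filter_cons]
    have hq : pvMatchB pat x.toList
        = (if pat.length ≠ x.toList.length then false else pvValidLoopA pat x.toList 0) := by
      by_cases hl : pat.length = x.toList.length
      · have hv := pvValid_eq_all pat x.toList hl 0
        simp only [List.drop_zero] at hv
        simp [pvMatchB, hl, hv]
      · have hl' : pat.length ≠ x.length := by simpa using hl
        simp [pvMatchB, hl']
    by_cases hl : pat.length = x.toList.length
    · by_cases hok : pvValidLoopA pat x.toList 0 = true
      · rw [if_neg (not_not_intro hl), if_pos hok, ih]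
        have hm : pvMatchB pat x.toList = true := by rw [hq, if_neg (not_not_intro hl)]; exact hok
        simp [hm]
      · rw [if_neg (not_not_intro hl), if_neg hok, ih]
        have hm : pvMatchB pat x.toList = false := by rw [hq, if_neg (not_not_intro hl)]; simpa using hok
        simp [hm]
    · rw [if_pos hl, ih]
      have hm : pvMatchB pat x.toList = false := by rw [hq, if_pos hl]
      simp [hm]

-- len(set(xs)) == len(xs) iff xs has no duplicates
theorem pvSetLen_iff {a : Type} [BEq a] [LawfulBEq a] (xs : List a) :
    (PySem.Set.ofList xs).length = xs.length ↔ xs.Nodup := by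
  induction xs with
  | nil => simp [PySem.Set.ofList, PySem.Set.empty]
  | cons x t ih =>
    rw [PySem.Set.ofList_cons]
    simp only [PySem.Set.discard, List.length_cons, List.nodup_cons]
    by_cases hx : x ∈ t
    · have hmem : x ∈ PySem.Set.ofList t := (PySem.Set.mem_ofList t x).mpr hx
      have hlt : ((PySem.Set.ofList t).filter (fun y => !y == x)).length < (PySem.Set.ofList t).length := by
        apply List.length_filter_lt_length_iff_exists.mpr
        exact ⟨x, hmem, by simp⟩
      have hle : (PySem.Set.ofList t).length ≤ t.length := PySem.Set.length_ofList_le t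
      constructor
      · intro hEq; omega
      · intro hnd; exact absurd hx hnd.1
    · have hfil : (PySem.Set.ofList t).filter (fun y => !y == x) = PySem.Set.ofList t := by
        apply List.filter_eq_self.mpr
        intro a ha
        have hat : a ∈ t := (PySem.Set.mem_ofList t a).mp ha
        simp only [Bool.not_eq_true', beq_eq_false_iff_ne, ne_eq]
        intro hax; exact hx (hax ▸ hat)
      rw [hfil]
      simp [hx, ih]

theorem pvFilterMap {α β : Type} (f : α → β) (p : β → Bool) (l : List α) :
    (l.map f).filter p = (l.filter (fun a => p (f a))).map f := by
  induction l with
  | nil => simp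
  | cons a t ih => by_cases h : p (f a) <;> simp [h, ih]

-- the DFS enumerates exactly the duplicate-free product combinations, sorted
theorem pvDfs_eq (cands : List (List String)) (path : List String) (h : path.Nodup) :
    pvDfsB cands path
      = ((pvProduct cands).filter (fun c => decide (path ++ c).Nodup)).map
          (fun c => PySem.List.sorted (path ++ c) (fun x => x) false) := by
  induction cands generalizing path with
  | nil => simp [pvDfsB, pvProduct, h]
  | cons l ls ih =>
    induction l with
    | nil => simp [pvDfsB, pvProduct]
    | cons x xs ihl =>
      show (x :: xs).flatMap _ = _
      rw [List.flatMap_cons]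
      conv_rhs => rw [pvProduct, List.flatMap_cons, List.filter_append, List.map_append]
      have htail : xs.flatMap (fun u => if u ∈ path then [] else pvDfsB ls (path ++ [u]))
          = ((xs.flatMap fun y => (pvProduct ls).map (y :: ·)).filter
              (fun c => decide (path ++ c).Nodup)).map
              (fun c => PySem.List.sorted (path ++ c) (fun x => x) false) := by
        simpa [pvDfsB, pvProduct] using ihl
      rw [← htail]
      refine congrArg₂ (· ++ ·) ?_ rfl
      by_cases hx : x ∈ path
      · rw [if_pos hx]
        symm
        rw [List.map_eq_nil_iff, List.filter_eq_nil_iff]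
        intro c hc
        obtain ⟨c', _, rfl⟩ := List.mem_map.mp hc
        simp only [decide_eq_true_eq]
        intro hn
        rw [List.nodup_append] at hn
        exact hn.2.2 x hx x (List.mem_cons_self ..) rfl
      · have hpx : (path ++ [x]).Nodup := by
          have hc : (x :: path).Nodup := List.nodup_cons.mpr ⟨hx, h⟩
          first
          | exact (List.perm_append_singleton x path).nodup hc
          | exact (List.perm_append_singleton x path).symm.nodup hc
        rw [if_neg hx, ih (path ++ [x]) hpx, pvFilterMap, List.map_map]
        simp only [Function.comp_def, List.append_assoc, List.singleton_append]

-- A's product-filter loop collected into filter + map form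
theorem pvDataAux (xs : List (List String)) (acc : List (List String)) :
    xs.foldl (fun acc comb =>
      if (PySem.Set.ofList comb).length ≠ comb.length then acc
      else acc ++ [PySem.List.sorted comb (fun x => x) false]) acc
    = acc ++ (xs.filter (fun c => decide c.Nodup)).map
        (fun c => PySem.List.sorted c (fun x => x) false) := by
  induction xs generalizing acc with
  | nil => simp
  | cons c t ih =>
    rw [List.foldl_cons, List.filter_cons]
    by_cases hc : c.Nodup
    · rw [if_neg (not_not_intro ((pvSetLen_iff c).mpr hc)), ih]
      simp [hc]
    · rw [if_pos (fun hEq => hc ((pvSetLen_iff c).mp hEq)), ih]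
      simp [hc]

-- ===== VERDICT (by name: the statement is the Claim_ definition above) =====
theorem solution_spec : Claim_equal_solution := by
  unfold Claim_equal_solution
  intro user_id banned_id _hdom
  unfold Spec_solution
  show solution user_id banned_id = solution_alt user_id banned_id
  unfold solution solution_alt
  have hb : (fun b : String => pvRowA b.toList user_id)
      = (fun p : String => user_id.filter (fun u => pvMatchB p.toList u.toList)) := by
    funext b
    simpa [pvRowA] using pvRowAux b.toList user_id []
  rw [hb]
  simp only [pvDataAux, List.nil_append]
  rw [pvDfs_eq _ [] List.nodup_nil]
  simp only [List.nil_append]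
  rfl
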